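-- pv_equiv track=rewrite | github.com/matthewjaykoster/Celeste-LevelData-Parser | scripts/generate_logic.py | collapseLocationCheckPathLogic
-- ===== SOURCE A (Python) =====
-- from typing import List
--
-- def collapseLocationCheckPathLogic(rules: List[List[List[str]]]) -> List[List[str]]:
--     """
--     Collapses logical path rules by expanding AND/OR logic into
--     a minimal list of AND-only rule sets.
--
--     Args:
--         rules (List[List[List[str]]]): Logical path rules.
--
--     Returns:
--         List[List[str]]: Simplified logical rule sets.
--     """
--
--     # Start with one empty path (neutral element for AND)
--     collapsedPaths: List[set[str]] = [set()]
--
--     for step in rules: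
--         nextPaths: List[set[str]] = []
--
--         for existing in collapsedPaths:
--             for option in step:
--                 merged = existing | set(option)
--                 nextPaths.append(merged)
--
--         collapsedPaths = nextPaths
--
--     # Convert back to sorted lists
--     return [sorted(path) for path in collapsedPaths]
-- ===== SOURCE B (Python) =====
-- from typing import List
--
--
-- def collapseLocationCheckPathLogic(rules: List[List[List[str]]]) -> List[List[str]]:
--     """Enumerate the combinations by mixed-radix index decoding: combination k's
--     digit for each step is extracted with % and // from k (last step varies
--     fastest), so no intermediate frontier of paths is ever materialised."""
--     total = 1
--     for step in rules:
--         total *= len(step)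
--     out = []
--     for k in range(total):
--         acc = set()
--         idx = k
--         for step in reversed(rules):
--             n = len(step)
--             d = idx % n
--             idx //= n
--             acc |= set(step[d])
--         out.append(sorted(acc))
--     return out
-- ===== Notes on version B (the rewrite author's own statement) =====
-- stated objective: alternative
-- what changed: Replaces A's accumulating frontier of partial path-sets with mixed-radix index decoding: the number of combinations is computed up front and each combination k is reconstructed digit by digit with % and // over the reversed step list, so no intermediate frontier is ever stored.
import Mathlib
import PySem

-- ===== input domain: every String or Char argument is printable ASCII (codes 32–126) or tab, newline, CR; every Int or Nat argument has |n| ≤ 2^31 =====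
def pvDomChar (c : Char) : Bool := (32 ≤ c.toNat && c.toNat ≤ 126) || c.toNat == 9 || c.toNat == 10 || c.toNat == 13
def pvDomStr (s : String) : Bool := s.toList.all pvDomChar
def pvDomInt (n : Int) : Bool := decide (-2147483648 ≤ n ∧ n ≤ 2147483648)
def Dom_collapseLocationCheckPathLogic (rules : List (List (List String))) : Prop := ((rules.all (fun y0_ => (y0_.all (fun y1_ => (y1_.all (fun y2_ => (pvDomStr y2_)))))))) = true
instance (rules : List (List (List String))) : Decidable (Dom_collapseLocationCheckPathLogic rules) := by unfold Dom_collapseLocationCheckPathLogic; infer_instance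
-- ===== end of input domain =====

-- B replaces A's accumulating frontier of partial path-sets with mixed-radix index
-- decoding: the combination count is computed up front and combination k is rebuilt
-- digit by digit with % and // over the reversed step list (alternative; no frontier).

-- ===== PORT A =====
-- Literal transliteration of A: a frontier of sets, expanded step by step,
-- inner loops appending to nextPaths; finally each set is sorted.
def collapseLocationCheckPathLogic (rules : List (List (List String))) : List (List String) :=
  let collapsedPaths : List (PySem.Set String) := [PySem.Set.empty]
  let collapsedPaths :=
    rules.foldl (fun collapsedPaths step =>
      collapsedPaths.foldl (fun nextPaths existing =>
        step.foldl (fun nextPaths option =>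
          nextPaths ++ [PySem.Set.union existing (PySem.Set.ofList option)]) nextPaths)
        ([] : List (PySem.Set String))) collapsedPaths
  collapsedPaths.map (fun path => PySem.List.sorted path (fun x => x) false)

-- ===== PORT B =====
-- total = product of step sizes; for k in range(total): decode k's mixed-radix
-- digits over reversed(rules) with % and //, union the chosen options, sort.
def collapseLocationCheckPathLogic_alt (rules : List (List (List String))) : List (List String) :=
  let total : Int := rules.foldl (fun t step => t * (step.length : Int)) 1
  (PySem.List.pyRange 0 total 1).map (fun k =>
    let st :=
      rules.reverse.foldl (fun (st : Int × PySem.Set String) step =>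
        let n : Int := step.length
        let d := PySem.Int.mod st.1 n          -- d = idx % n  (n > 0 whenever this loop body runs: total > 0)
        let idx := PySem.Int.floordiv st.1 n   -- idx //= n
        -- step[d]: d is provably in range here (0 ≤ d < n), so Python never raises
        (idx, PySem.Set.union st.2 (PySem.Set.ofList (PySem.List.pyGetD step d []))))
        (k, PySem.Set.empty)
    PySem.List.sorted st.2 (fun x => x) false)

-- ===== PRECONDITION & SPEC =====
def Spec_collapseLocationCheckPathLogic (rules : List (List (List String))) (out : List (List String)) : Prop := out = collapseLocationCheckPathLogic_alt rules
instance (rules : List (List (List String))) (out : List (List String)) : Decidable (Spec_collapseLocationCheckPathLogic rules out) := by unfold Spec_collapseLocationCheckPathLogic; infer_instance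

-- ===== CLAIM (what is proved, stated in full; the proofs are below) =====
def Claim_equal_collapseLocationCheckPathLogic : Prop := ∀ (rules : List (List (List String))), Dom_collapseLocationCheckPathLogic rules → Spec_collapseLocationCheckPathLogic rules (collapseLocationCheckPathLogic rules)

-- ===== LEMMAS AND PROOFS =====

-- itertools-style Cartesian product (first axis slowest); proof-only intermediate object.
def pvProduct (rules : List (List (List String))) : List (List (List String)) :=
  match rules with
  | [] => [[]]
  | step :: rest => step.flatMap (fun option => (pvProduct rest).map (fun combo => option :: combo))

-- product of the step sizes, as a Nat
def pvN (rules : List (List (List String))) : Nat :=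
  match rules with
  | [] => 1
  | step :: rest => step.length * pvN rest

-- recursive form of B's inner decoding fold over reversed(rules)
def pvDec (rules : List (List (List String))) (k : Int) (s : PySem.Set String) :
    Int × PySem.Set String :=
  match rules with
  | [] => (k, s)
  | step :: rest =>
    let p := pvDec rest k s
    (PySem.Int.floordiv p.1 (step.length : Int),
     PySem.Set.union p.2 (PySem.Set.ofList (PySem.List.pyGetD step (PySem.Int.mod p.1 (step.length : Int)) [])))

-- ===== A-side shape lemmas =====

-- existing | set(option) adds exactly the same elements as existing | option (dedup is idempotent).
theorem pv_union_ofList {s : PySem.Set String} {o : List String} :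
    PySem.Set.union s (PySem.Set.ofList o) = PySem.Set.union s o := by
  show PySem.Set.update s (PySem.Set.ofList o) = PySem.Set.update s o
  rw [PySem.Set.update_eq_append_filter, PySem.Set.update_eq_append_filter,
    PySem.Set.ofList_ofList]

-- A's innermost loop appends one merged set per option.
theorem pv_inner (step : List (List String)) (ex : PySem.Set String)
    (np : List (PySem.Set String)) :
    step.foldl (fun nextPaths option =>
        nextPaths ++ [PySem.Set.union ex (PySem.Set.ofList option)]) np
      = np ++ step.map (fun option => PySem.Set.union ex option) := by
  induction step generalizing np with
  | nil => simp
  | cons o rest ih =>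
    rw [List.foldl_cons, ih, pv_union_ofList]
    simp

-- A's middle loop is a flatMap over the frontier.
theorem pv_body (step : List (List String)) (paths : List (PySem.Set String)) :
    paths.foldl (fun nextPaths existing =>
        step.foldl (fun nextPaths option =>
          nextPaths ++ [PySem.Set.union existing (PySem.Set.ofList option)]) nextPaths)
        ([] : List (PySem.Set String))
      = paths.flatMap (fun ex => step.map (fun option => PySem.Set.union ex option)) := by
  have h : ∀ (ps : List (PySem.Set String)) (acc : List (PySem.Set String)),
      ps.foldl (fun nextPaths existing =>
        step.foldl (fun nextPaths option =>
          nextPaths ++ [PySem.Set.union existing (PySem.Set.ofList option)]) nextPaths) acc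
      = acc ++ ps.flatMap (fun ex => step.map (fun option => PySem.Set.union ex option)) := by
    intro ps
    induction ps with
    | nil => intro acc; simp
    | cons e rest ih =>
      intro acc
      rw [List.foldl_cons, pv_inner, ih, List.flatMap_cons, List.append_assoc]
  simpa using h paths []

-- The whole frontier fold equals mapping the sequential union over the Cartesian product.
theorem pv_main (rules : List (List (List String))) (acc : List (PySem.Set String)) :
    rules.foldl (fun collapsedPaths step =>
      collapsedPaths.foldl (fun nextPaths existing =>
        step.foldl (fun nextPaths option =>
          nextPaths ++ [PySem.Set.union existing (PySem.Set.ofList option)]) nextPaths)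
        ([] : List (PySem.Set String))) acc
      = acc.flatMap (fun ex => (pvProduct rules).map (fun combo =>
          combo.foldl (fun s option => PySem.Set.union s option) ex)) := by
  induction rules generalizing acc with
  | nil => simp [pvProduct]
  | cons step rest ih =>
    rw [List.foldl_cons, pv_body, ih, List.flatMap_assoc]
    simp only [pvProduct, List.map_flatMap, List.flatMap_map, List.map_map,
      Function.comp_def, List.foldl_cons]

-- ===== B-side shape lemmas =====

-- B's foldl over rules.reverse is the structural recursion pvDec.
theorem pvDec_eq_foldl (rules : List (List (List String))) (k : Int) :
    rules.reverse.foldl (fun (st : Int × PySem.Set String) step =>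
        (PySem.Int.floordiv st.1 (step.length : Int),
         PySem.Set.union st.2 (PySem.Set.ofList
           (PySem.List.pyGetD step (PySem.Int.mod st.1 (step.length : Int)) []))))
      (k, PySem.Set.empty)
      = pvDec rules k PySem.Set.empty := by
  induction rules with
  | nil => rfl
  | cons step rest ih =>
    rw [List.reverse_cons, List.foldl_append, ih]
    rfl

-- pvDec's quotient component does not depend on the carried set.
theorem pvDec_fst (rules : List (List (List String))) (k : Int) (s t : PySem.Set String) :
    (pvDec rules k s).1 = (pvDec rules k t).1 := by
  induction rules with
  | nil => rfl
  | cons step rest ih => simp only [pvDec]; rw [ih]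

-- the decoded set is the carried set plus the options decoded from an empty start
theorem pvDec_mem (rules : List (List (List String))) (k : Int) (s : PySem.Set String)
    (x : String) :
    x ∈ (pvDec rules k s).2 ↔ x ∈ s ∨ x ∈ (pvDec rules k PySem.Set.empty).2 := by
  induction rules generalizing s with
  | nil => simp [pvDec, PySem.Set.empty]
  | cons step rest ih =>
    simp only [pvDec, PySem.Set.mem_union]
    rw [pvDec_fst rest k s PySem.Set.empty, ih]
    tauto

theorem pvDec_nodup (rules : List (List (List String))) (k : Int) (s : PySem.Set String)
    (hs : s.Nodup) : (pvDec rules k s).2.Nodup := by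
  induction rules with
  | nil => exact hs
  | cons step rest ih =>
    simp only [pvDec]
    exact PySem.Set.nodup_union _ _ ih

theorem pvN_pos (rules : List (List (List String))) (hne : ∀ st ∈ rules, st ≠ []) :
    0 < pvN rules := by
  induction rules with
  | nil => simp [pvN]
  | cons step rest ih =>
    have h1 : step ≠ [] := hne step (by simp)
    have h2 := ih (fun st hst => hne st (by simp [hst]))
    have : 0 < step.length := List.length_pos_of_ne_nil h1
    simpa [pvN] using Nat.mul_pos this h2

theorem pvN_eq_zero (rules : List (List (List String))) (h : ¬ ∀ st ∈ rules, st ≠ []) :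
    pvN rules = 0 := by
  induction rules with
  | nil => exact absurd (by simp) h
  | cons step rest ih =>
    by_cases hstep : step = []
    · simp [pvN, hstep]
    · have : ¬ ∀ st ∈ rest, st ≠ [] := by
        intro hall
        exact h (by intro st hst; rcases List.mem_cons.mp hst with h1 | h1
                    · simpa [h1] using hstep
                    · exact hall st h1)
      simp [pvN, ih this]

theorem pvProduct_eq_nil (rules : List (List (List String))) (h : ¬ ∀ st ∈ rules, st ≠ []) :
    pvProduct rules = [] := by
  induction rules with
  | nil => exact absurd (by simp) h
  | cons step rest ih =>
    by_cases hstep : step = []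
    · simp [pvProduct, hstep]
    · have : ¬ ∀ st ∈ rest, st ≠ [] := by
        intro hall
        exact h (by intro st hst; rcases List.mem_cons.mp hst with h1 | h1
                    · simpa [h1] using hstep
                    · exact hall st h1)
      simp [pvProduct, ih this]

theorem pv_total (rules : List (List (List String))) (c : Int) :
    rules.foldl (fun t step => t * (step.length : Int)) c = c * (pvN rules : Int) := by
  induction rules generalizing c with
  | nil => simp [pvN]
  | cons step rest ih =>
    rw [List.foldl_cons, ih]
    push_cast [pvN]
    ring

-- quotient/remainder splitting of the decoder
theorem pvDec_split (rules : List (List (List String))) (hne : ∀ st ∈ rules, st ≠ [])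
    (i j : Nat) (s : PySem.Set String) (hj : j < pvN rules) :
    pvDec rules ((i * pvN rules + j : Nat) : Int) s = ((i : Int), (pvDec rules (j : Int) s).2) := by
  revert hne hj
  induction rules generalizing i j s with
  | nil =>
    intro _ hj
    have hj0 : j = 0 := by simpa [pvN] using hj
    subst hj0
    simp [pvDec, pvN]
  | cons step rest ih =>
    intro hne hj
    have hstep : step ≠ [] := hne step (by simp)
    have hne' : ∀ st ∈ rest, st ≠ [] := fun st h => hne st (by simp [h])
    have hL : 0 < step.length := List.length_pos_of_ne_nil hstep
    have hM : 0 < pvN rest := pvN_pos rest hne'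
    have hjM : j < step.length * pvN rest := by simpa [pvN] using hj
    obtain ⟨q, r, hqL, hrM, rfl⟩ :
        ∃ q r, q < step.length ∧ r < pvN rest ∧ q * pvN rest + r = j := by
      refine ⟨j / pvN rest, j % pvN rest, (Nat.div_lt_iff_lt_mul hM).mpr hjM, Nat.mod_lt _ hM, ?_⟩
      rw [Nat.mul_comm]; exact Nat.div_add_mod j (pvN rest)
    have hkey : i * pvN (step :: rest) + (q * pvN rest + r)
        = (i * step.length + q) * pvN rest + r := by
      show i * (step.length * pvN rest) + (q * pvN rest + r) = _
      ring
    have hdiv : (i * step.length + q) / step.length = i := by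
      rw [Nat.mul_comm i step.length, Nat.mul_add_div hL, Nat.div_eq_of_lt hqL, Nat.add_zero]
    have hmod : (i * step.length + q) % step.length = q := by
      rw [Nat.mul_comm i step.length, Nat.mul_add_mod, Nat.mod_eq_of_lt hqL]
    simp only [pvDec, hkey]
    rw [ih (i * step.length + q) r s hne' hrM, ih q r s hne' hrM]
    rw [PySem.Int.floordiv_natCast, PySem.Int.mod_natCast, hdiv, hmod]
    rw [PySem.Int.mod_natCast, Nat.mod_eq_of_lt hqL]

-- range (L*M) enumerated block by block
theorem pv_range_mul (L M : Nat) :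
    List.range (L * M) = (List.range L).flatMap (fun i => (List.range M).map (fun j => i * M + j)) := by
  induction L with
  | zero => simp
  | succ L ih =>
    rw [Nat.succ_mul, List.range_add, ih, List.range_succ, List.flatMap_append]
    simp [Nat.add_comm]

-- a flatMap over a list is a flatMap over its index range
theorem pv_flatMap_range {α β : Type} (l : List α) (d : α) (f : α → List β) :
    (List.range l.length).flatMap (fun i => f (l.getD i d)) = l.flatMap f := by
  induction l with
  | nil => simp
  | cons a t ih =>
    rw [List.length_cons, List.range_succ_eq_map, List.flatMap_cons, List.flatMap_map]
    simpa using congrArg (f a ++ ·) ih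

-- main correspondence on rules with no empty step
theorem pv_core (rules : List (List (List String))) (hne : ∀ st ∈ rules, st ≠ [])
    (s : PySem.Set String) (hs : s.Nodup) :
    (List.range (pvN rules)).map (fun (j : Nat) =>
        PySem.List.sorted (pvDec rules (j : Int) s).2 (fun x => x) false)
      = (pvProduct rules).map (fun combo =>
        PySem.List.sorted (combo.foldl (fun t o => PySem.Set.union t o) s) (fun x => x) false) := by
  revert hne
  induction rules generalizing s with
  | nil =>
    intro _
    simp [pvN, pvProduct, pvDec]
  | cons step rest ih =>
    intro hne
    have hstep : step ≠ [] := hne step (by simp)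
    have hne' : ∀ st ∈ rest, st ≠ [] := fun st h => hne st (by simp [h])
    have hM : 0 < pvN rest := pvN_pos rest hne'
    have hsplit : pvN (step :: rest) = step.length * pvN rest := rfl
    -- the common middle form: blocks indexed by the option position i, inner index j
    have hmid :
        (List.range (pvN (step :: rest))).map (fun (j : Nat) =>
            PySem.List.sorted (pvDec (step :: rest) (j : Int) s).2 (fun x => x) false)
          = (List.range step.length).flatMap (fun (i : Nat) => (List.range (pvN rest)).map (fun (j : Nat) =>
              PySem.List.sorted
                (pvDec rest (j : Int) (PySem.Set.union s (step.getD i []))).2 (fun x => x) false)) := by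
      rw [hsplit, pv_range_mul, List.map_flatMap]
      apply List.flatMap_congr
      intro i hi
      rw [List.map_map]
      apply List.map_congr_left
      intro j hj
      have hi' : i < step.length := List.mem_range.mp hi
      have hj' : j < pvN rest := List.mem_range.mp hj
      simp only [Function.comp_def, pvDec]
      rw [pvDec_split rest hne' i j s hj']
      simp only [PySem.Int.mod_natCast, Nat.mod_eq_of_lt hi', PySem.List.pyGetD_natCast,
        pv_union_ofList]
      -- both sets hold the same elements and are duplicate-free, so sorting agrees
      rw [PySem.List.sorted_id_eq_sorted_id_iff_perm]
      rw [List.perm_ext_iff_of_nodup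
        (PySem.Set.nodup_union _ _ (pvDec_nodup rest (j : Int) s hs))
        (pvDec_nodup rest (j : Int) _ (PySem.Set.nodup_union _ _ hs))]
      intro a
      have h1 := pvDec_mem rest ((j : Nat) : Int) s a
      have h2 := pvDec_mem rest ((j : Nat) : Int) (PySem.Set.union s (step.getD i [])) a
      rw [PySem.Set.mem_union, h1, h2, PySem.Set.mem_union]
      tauto
    rw [hmid]
    -- the product side folds its head option into the carried set and recurses
    simp only [pvProduct, List.map_flatMap, List.map_map]
    rw [← pv_flatMap_range step ([] : List String)]
    apply List.flatMap_congr
    intro i _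
    rw [ih (PySem.Set.union s (step.getD i [])) (PySem.Set.nodup_union _ _ hs) hne']
    apply List.map_congr_left
    intro combo _
    simp only [Function.comp_def, List.foldl_cons]

-- ===== VERDICT (by name: the statement is the Claim_ definition above) =====
theorem collapseLocationCheckPathLogic_spec : Claim_equal_collapseLocationCheckPathLogic := by
  intro rules _
  show collapseLocationCheckPathLogic rules = collapseLocationCheckPathLogic_alt rules
  simp only [collapseLocationCheckPathLogic, collapseLocationCheckPathLogic_alt]
  rw [pv_main, pv_total, one_mul, PySem.List.pyRange_zero_natCast, List.map_map]
  simp only [Function.comp_def, pvDec_eq_foldl]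
  by_cases h : ∀ st ∈ rules, st ≠ []
  · rw [pv_core rules h PySem.Set.empty List.nodup_nil]
    simp
  · rw [pvProduct_eq_nil rules h, pvN_eq_zero rules h]
    simp
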